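-- pv_equiv track=rewrite | github.com/h6h60314-a11y/copy-work-efficiency-app | pages/10_進貨驗收量.py | _trim_trailing_nones
-- ===== SOURCE A (Python) =====
-- def _trim_trailing_nones(vals):
--     last = -1
--     for i, v in enumerate(vals):
--         if v is None:
--             continue
--         if isinstance(v, str) and v.strip() == "":
--             continue
--         last = i
--     if last < 0:
--         return []
--     return vals[: last + 1]
-- ===== SOURCE B (Python) =====
-- def _trim_trailing_nones(vals):
--     end = len(vals)
--     while end > 0:
--         v = vals[end - 1]
--         if v is None or (isinstance(v, str) and v.strip() == ""):
--             end -= 1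
--         else:
--             break
--     return vals[:end]
-- ===== Notes on version B (the rewrite author's own statement) =====
-- stated objective: faster
-- what changed: B scans backward from the tail with early termination and returns one slice, instead of A's full forward pass over enumerate tracking the last non-blank index.
import Mathlib
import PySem

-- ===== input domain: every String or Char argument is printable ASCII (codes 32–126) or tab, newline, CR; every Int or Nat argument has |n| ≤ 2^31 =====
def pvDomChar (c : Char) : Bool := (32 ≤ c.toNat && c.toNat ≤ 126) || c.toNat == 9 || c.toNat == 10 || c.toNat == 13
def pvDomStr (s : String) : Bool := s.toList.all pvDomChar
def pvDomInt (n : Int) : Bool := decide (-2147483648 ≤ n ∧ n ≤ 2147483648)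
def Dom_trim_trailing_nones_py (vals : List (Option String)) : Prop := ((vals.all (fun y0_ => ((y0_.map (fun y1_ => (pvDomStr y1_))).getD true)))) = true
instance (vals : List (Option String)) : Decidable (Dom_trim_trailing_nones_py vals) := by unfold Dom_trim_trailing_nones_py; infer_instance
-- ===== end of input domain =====

-- B scans backward from the tail with early termination instead of A's full
-- forward pass tracking the last non-blank index (objective: alternative).

-- ===== PORT A =====
-- forward pass: last = index of last non-blank element, -1 if none
def trim_trailing_nones_py (vals : List (Option String)) : List (Option String) :=
  let last : Int := (PySem.List.enumerate vals 0).foldl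
    (fun last p =>
      match p.2 with
      | none => last                                             -- if v is None: continue
      | some s => if PySem.Str.strip s == "" then last else p.1) -- blank str: continue; else last = i
    (-1)
  if last < 0 then [] else PySem.List.slice vals none (some (last + 1))

-- ===== PORT B =====
-- blank test: v is None or (isinstance(v, str) and v.strip() == "")
def pvAltBlank (v : Option String) : Bool :=
  match v with
  | none => true
  | some s => PySem.Str.strip s == ""

-- while end > 0 and vals[end-1] blank: end -= 1   (index end-1 is always in range)
def pvAltLoop (vals : List (Option String)) : Nat → Nat
  | 0 => 0
  | e + 1 => if pvAltBlank (vals.getD e none) then pvAltLoop vals e else e + 1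

def trim_trailing_nones_py_alt (vals : List (Option String)) : List (Option String) :=
  PySem.List.slice vals none (some ((pvAltLoop vals vals.length : Nat) : Int))

-- ===== PRECONDITION & SPEC =====
def Spec_trim_trailing_nones_py (vals : List (Option String)) (out : List (Option String)) : Prop := out = trim_trailing_nones_py_alt vals
instance (vals : List (Option String)) (out : List (Option String)) : Decidable (Spec_trim_trailing_nones_py vals out) := by unfold Spec_trim_trailing_nones_py; infer_instance

-- ===== CLAIM (what is proved, stated in full; the proofs are below) =====
def Claim_equal_trim_trailing_nones_py : Prop := ∀ (vals : List (Option String)), Dom_trim_trailing_nones_py vals → Spec_trim_trailing_nones_py vals (trim_trailing_nones_py vals)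

-- ===== LEMMAS AND PROOFS =====

-- A's accumulator, named for the proofs
def pvLastA (vals : List (Option String)) : Int :=
  (PySem.List.enumerate vals 0).foldl
    (fun last p =>
      match p.2 with
      | none => last
      | some s => if PySem.Str.strip s == "" then last else p.1)
    (-1)

theorem pvLastA_concat (xs : List (Option String)) (x : Option String) :
    pvLastA (xs ++ [x]) = if pvAltBlank x then pvLastA xs else (xs.length : Int) := by
  unfold pvLastA
  rw [PySem.List.enumerate_append, List.foldl_append]
  cases x with
  | none => simp [PySem.List.enumerate, pvAltBlank]
  | some s =>
    simp only [PySem.List.enumerate_cons, PySem.List.enumerate_nil, List.foldl_cons,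
      List.foldl_nil, pvAltBlank]
    split <;> simp

theorem pvLastA_lt_length (vals : List (Option String)) :
    pvLastA vals < (vals.length : Int) := by
  induction vals using List.reverseRecOn with
  | nil => simp [pvLastA, PySem.List.enumerate]
  | append_singleton xs x ih =>
    rw [pvLastA_concat]
    split
    · simp only [List.length_append, List.length_cons, List.length_nil]
      omega
    · simp

theorem pvAltLoop_le (vals : List (Option String)) (e : Nat) : pvAltLoop vals e ≤ e := by
  induction e with
  | zero => simp [pvAltLoop]
  | succ e ih =>
    unfold pvAltLoop
    split
    · omega
    · omega

theorem pvAltLoop_concat_le (xs : List (Option String)) (x : Option String) (e : Nat)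
    (h : e ≤ xs.length) : pvAltLoop (xs ++ [x]) e = pvAltLoop xs e := by
  induction e with
  | zero => rfl
  | succ e ih =>
    unfold pvAltLoop
    rw [List.getD_append _ _ _ _ (by omega), ih (by omega)]

theorem pvAltLoop_succ (vals : List (Option String)) (e : Nat) :
    pvAltLoop vals (e + 1) = if pvAltBlank (vals.getD e none) then pvAltLoop vals e else e + 1 := rfl

theorem trim_eq_take (vals : List (Option String)) :
    trim_trailing_nones_py_alt vals = vals.take (pvAltLoop vals vals.length) := by
  unfold trim_trailing_nones_py_alt
  rw [PySem.List.slice_to_natCast]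

-- ===== VERDICT (by name: the statement is the Claim_ definition above) =====
theorem trim_trailing_nones_py_spec : Claim_equal_trim_trailing_nones_py := by
  unfold Claim_equal_trim_trailing_nones_py
  intro vals hdom
  unfold Spec_trim_trailing_nones_py
  show trim_trailing_nones_py vals = trim_trailing_nones_py_alt vals
  induction vals using List.reverseRecOn with
  | nil => rfl
  | append_singleton xs x ih =>
    have hdomxs : Dom_trim_trailing_nones_py xs := by
      unfold Dom_trim_trailing_nones_py at hdom ⊢
      simp [List.all_append] at hdom
      simp only [List.all_eq_true]
      exact hdom.1
    have hA : trim_trailing_nones_py (xs ++ [x])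
        = if pvLastA (xs ++ [x]) < 0 then []
          else PySem.List.slice (xs ++ [x]) none (some (pvLastA (xs ++ [x]) + 1)) := rfl
    have hA' : trim_trailing_nones_py xs
        = if pvLastA xs < 0 then []
          else PySem.List.slice xs none (some (pvLastA xs + 1)) := rfl
    rw [trim_eq_take]
    have hlen : (xs ++ [x]).length = xs.length + 1 := by simp
    rw [hlen]
    by_cases hb : pvAltBlank x = true
    · -- trailing element is blank: both sides reduce to the xs case
      have hloop : pvAltLoop (xs ++ [x]) (xs.length + 1) = pvAltLoop xs xs.length := by
        rw [pvAltLoop_succ]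
        have hx : (xs ++ [x]).getD xs.length none = x := by simp [List.getD]
        rw [hx, if_pos hb]
        exact pvAltLoop_concat_le xs x xs.length le_rfl
      rw [hloop]
      have hBxs : trim_trailing_nones_py_alt xs = xs.take (pvAltLoop xs xs.length) :=
        trim_eq_take xs
      have hle : pvAltLoop xs xs.length ≤ xs.length := pvAltLoop_le xs xs.length
      rw [List.take_append_of_le_length hle]
      rw [hA, pvLastA_concat, if_pos hb]
      by_cases hneg : pvLastA xs < 0
      · rw [if_pos hneg]
        have := ih hdomxs
        rw [hA', if_pos hneg] at this
        rw [hBxs] at this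
        exact this
      · rw [if_neg hneg]
        have hlt := pvLastA_lt_length xs
        have h0 : (0:Int) ≤ pvLastA xs + 1 := by omega
        rw [PySem.List.slice_to _ h0,
          List.take_append_of_le_length (by omega : (pvLastA xs + 1).toNat ≤ xs.length)]
        have := ih hdomxs
        rw [hA', if_neg hneg, PySem.List.slice_to _ h0, hBxs] at this
        exact this
    · -- trailing element not blank: both sides are the whole list
      have hloop : pvAltLoop (xs ++ [x]) (xs.length + 1) = xs.length + 1 := by
        rw [pvAltLoop_succ]
        have hx : (xs ++ [x]).getD xs.length none = x := by simp [List.getD]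
        rw [hx, if_neg hb]
      rw [hloop]
      rw [List.take_of_length_le (by simp)]
      rw [hA, pvLastA_concat, if_neg hb, if_neg (by omega)]
      rw [PySem.List.slice_to _ (by omega : (0:Int) ≤ (xs.length : Int) + 1)]
      rw [List.take_of_length_le (by simp)]
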